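-- pv_equiv track=rewrite | github.com/xtechon-techology/AutomotiveVoiceAI | visualiser/chart_handlers_backup.py | sort_dict_data
-- ===== SOURCE A (Python) =====
-- def sort_dict_data(data_dict, sort_column):
--     # Get the data from the dictionary
--     data_lists = list(data_dict.values())
--
--     # Find the index of the sort column
--     try:
--         sort_index = list(data_dict.keys()).index(sort_column)
--     except ValueError:
--         raise ValueError(f"'{sort_column}' not found in the dictionary keys.")
--
--     # Transpose the data to sort by the specified column
--     try:
--         transposed_data = list(zip(*data_lists))
--
--         # Sort the data based on the specified column
--         sorted_data = sorted(transposed_data, key=lambda x: x[sort_index])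
--
--         # Transpose the sorted data back to the original format
--         sorted_data_lists = list(zip(*sorted_data))
--
--         # Create a new dictionary with the sorted data
--         sorted_dict = {column: sorted_data_list for column, sorted_data_list in
--                        zip(data_dict.keys(), sorted_data_lists)}
--
--         return sorted_dict
--     except Exception as e:
--         return data_dict
-- ===== SOURCE B (Python) =====
-- def sort_dict_data(data_dict, sort_column):
--     keys = list(data_dict.keys())
--     if sort_column not in keys:
--         raise ValueError(f"'{sort_column}' not found in the dictionary keys.")
--     sort_index = keys.index(sort_column)
--     columns = list(data_dict.values())
--     n = min(len(c) for c in columns)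
--     if n == 0:
--         return {}
--     order = sorted(range(n), key=lambda i: columns[sort_index][i])
--     return {k: tuple(col[i] for i in order) for k, col in zip(keys, columns)}
-- ===== Notes on version B (the rewrite author's own statement) =====
-- stated objective: alternative
-- what changed: Replaces A's transpose-rows/sort-rows/transpose-back pipeline by an argsort of the row indices (stable sort of range(n) keyed by the sort column) followed by a per-column gather, never materialising the row tuples.
import Mathlib
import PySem

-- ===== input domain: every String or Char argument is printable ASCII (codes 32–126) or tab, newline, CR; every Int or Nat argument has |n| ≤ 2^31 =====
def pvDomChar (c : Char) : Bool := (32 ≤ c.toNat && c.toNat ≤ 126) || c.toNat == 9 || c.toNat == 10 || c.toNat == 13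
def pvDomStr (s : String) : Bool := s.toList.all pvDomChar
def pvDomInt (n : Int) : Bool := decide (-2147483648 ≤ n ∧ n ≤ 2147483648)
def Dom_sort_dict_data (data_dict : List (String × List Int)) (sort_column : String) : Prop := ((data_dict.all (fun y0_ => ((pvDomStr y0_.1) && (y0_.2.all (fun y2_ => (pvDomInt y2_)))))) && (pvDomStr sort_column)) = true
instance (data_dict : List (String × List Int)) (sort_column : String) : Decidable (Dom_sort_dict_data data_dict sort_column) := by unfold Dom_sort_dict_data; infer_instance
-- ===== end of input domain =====

-- B replaces A's transpose → sort rows → transpose-back pipeline by an argsort of the row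
-- indices followed by a per-column gather (same asymptotic cost; objective: alternative).

-- min(len(c) for c in ls); 0 for the empty list (where Python's zip(*[]) also yields no rows)
def pvMinLen : List (List Int) → Nat
  | [] => 0
  | [c] => c.length
  | c :: c' :: rest => min c.length (pvMinLen (c' :: rest))

-- list(zip(*ls)): the rows 0 ≤ i < min length; every index used is in range, so getD is exact
def pvZipStar (ls : List (List Int)) : List (List Int) :=
  (List.range (pvMinLen ls)).map (fun i => ls.map (fun c => c.getD i 0))

-- ===== PORT A =====
-- A's `except Exception: return data_dict` branch is unreachable on int-valued columns
-- (the sort key is always an Int), so it has no counterpart here; the ValueError on a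
-- missing key is the `none` branch, excluded by Pre_.
def sort_dict_data (data_dict : List (String × List Int)) (sort_column : String) : List (String × List Int) :=
  let data_lists := data_dict.map (·.2)
  match PySem.List.index? (data_dict.map (·.1)) sort_column with
  | none => []  -- Python raises ValueError here; outside Pre_
  | some sort_index =>
    let transposed_data := pvZipStar data_lists
    let sorted_data := PySem.List.sorted transposed_data (fun x => x.getD sort_index 0) false
    let sorted_data_lists := pvZipStar sorted_data
    (data_dict.map (·.1)).zip sorted_data_lists

-- ===== PORT B =====
def sort_dict_data_alt (data_dict : List (String × List Int)) (sort_column : String) : List (String × List Int) :=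
  let keys := data_dict.map (·.1)
  match PySem.List.index? keys sort_column with
  | none => []  -- Python raises ValueError here; outside Pre_
  | some sort_index =>
    let columns := data_dict.map (·.2)
    let n := pvMinLen columns
    if n = 0 then []
    else
      let keyCol := columns.getD sort_index []
      let order := PySem.List.sorted (List.range n) (fun i => keyCol.getD i 0) false
      data_dict.map (fun kc => (kc.1, order.map (fun i => kc.2.getD i 0)))

-- ===== PRECONDITION & SPEC =====
-- Pre_ excludes exactly the inputs where A raises ValueError: sort_column not among the keys.
def Pre_sort_dict_data (data_dict : List (String × List Int)) (sort_column : String) : Prop :=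
  sort_column ∈ data_dict.map Prod.fst
instance (data_dict : List (String × List Int)) (sort_column : String) : Decidable (Pre_sort_dict_data data_dict sort_column) := by unfold Pre_sort_dict_data; infer_instance
def pvWitness_sort_dict_data : (List (String × List Int)) × String := ([("a", [2, 1]), ("b", [10, 20])], "a")

def Spec_sort_dict_data (data_dict : List (String × List Int)) (sort_column : String) (out : List (String × List Int)) : Prop := out = sort_dict_data_alt data_dict sort_column
instance (data_dict : List (String × List Int)) (sort_column : String) (out : List (String × List Int)) : Decidable (Spec_sort_dict_data data_dict sort_column out) := by unfold Spec_sort_dict_data; infer_instance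

-- ===== CLAIM (what is proved, stated in full; the proofs are below) =====
def Claim_equal_sort_dict_data : Prop := ∀ (data_dict : List (String × List Int)) (sort_column : String), Dom_sort_dict_data data_dict sort_column → Pre_sort_dict_data data_dict sort_column → Spec_sort_dict_data data_dict sort_column (sort_dict_data data_dict sort_column)

-- ===== LEMMAS AND PROOFS =====

theorem pv_insertBy_map {α β κ : Type} [LT κ] [DecidableLT κ] (f : α → β) (key : β → κ)
    (x : α) (ys : List α) :
    PySem.List.insertBy (fun a b => decide (key a < key b)) (f x) (ys.map f)
      = (PySem.List.insertBy (fun a b => decide (key (f a) < key (f b))) x ys).map f := by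
  induction ys with
  | nil => simp [PySem.List.insertBy]
  | cons y ys ih =>
    simp only [List.map_cons, PySem.List.insertBy]
    by_cases hb : key (f x) < key (f y) <;> simp [hb, ih]

theorem pv_foldl_insertBy_map {α β κ : Type} [LT κ] [DecidableLT κ] (f : α → β) (key : β → κ)
    (xs : List α) : ∀ acc : List α,
    List.foldl (fun acc x => PySem.List.insertBy (fun a b => decide (key a < key b)) x acc)
        (acc.map f) (xs.map f)
      = (List.foldl (fun acc x =>
          PySem.List.insertBy (fun a b => decide (key (f a) < key (f b))) x acc) acc xs).map f := by
  induction xs with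
  | nil => intro acc; simp
  | cons x xs ih =>
    intro acc
    simp only [List.map_cons, List.foldl_cons]
    rw [pv_insertBy_map f key x acc, ih]

-- stable sort commutes with mapping when the key factors through the map
theorem pv_sorted_map {α β κ : Type} [LT κ] [DecidableLT κ] (f : α → β) (key : β → κ)
    (xs : List α) :
    PySem.List.sorted (xs.map f) key false
      = (PySem.List.sorted xs (fun a => key (f a)) false).map f := by
  rw [PySem.List.sorted_eq_foldl_insertBy, PySem.List.sorted_eq_foldl_insertBy]
  simpa using pv_foldl_insertBy_map f key xs []

theorem pv_minLen_const (k : Nat) : ∀ ls : List (List Int), ls ≠ [] →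
    (∀ c ∈ ls, c.length = k) → pvMinLen ls = k := by
  intro ls
  induction ls with
  | nil => intro h; exact absurd rfl h
  | cons c rest ih =>
    intro _ hall
    match rest with
    | [] => simpa using hall c (by simp)
    | c' :: rest' =>
      have h1 : c.length = k := hall c (by simp)
      have h2 : pvMinLen (c' :: rest') = k :=
        ih (by simp) (fun x hx => hall x (by simp [hx]))
      simp [pvMinLen, h1, h2]

theorem sort_dict_data_eq (data_dict : List (String × List Int)) (sort_column : String)
    (hpre : Pre_sort_dict_data data_dict sort_column) :
    sort_dict_data data_dict sort_column = sort_dict_data_alt data_dict sort_column := by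
  have hmem : sort_column ∈ data_dict.map Prod.fst := hpre
  have hsome : (PySem.List.index? (data_dict.map (·.1)) sort_column).isSome := by
    rw [PySem.List.index?_isSome_iff]; exact hmem
  obtain ⟨si, h⟩ := Option.isSome_iff_exists.mp hsome
  obtain ⟨hsi, _hval, _⟩ := PySem.List.getElem_of_index?_eq_some h
  have hsc : si < data_dict.length := by simpa using hsi
  simp only [sort_dict_data, sort_dict_data_alt, h]
  set cols := data_dict.map (·.2) with hcols
  have hcl : cols.length = data_dict.length := by simp [hcols]
  by_cases hn : pvMinLen cols = 0
  · -- no rows: both sides are the empty dict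
    rw [if_pos hn]
    simp [pvZipStar, hn, pvMinLen, PySem.List.sorted]
  · rw [if_neg hn]
    set n := pvMinLen cols with hndef
    set g : Nat → List Int := fun i => cols.map (fun c => c.getD i 0) with hg
    have hrows : pvZipStar cols = (List.range n).map g := rfl
    -- the sort key of row (g i) is column si at index i
    have hkey : (fun a => (g a).getD si 0) = (fun i => (cols.getD si []).getD i 0) := by
      funext i
      have : si < cols.length := by omega
      simp [hg, List.getD_eq_getElem?_getD, List.getElem?_eq_getElem this]
    set order := PySem.List.sorted (List.range n) (fun i => (cols.getD si []).getD i 0) false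
      with horder
    have hsorted : PySem.List.sorted (pvZipStar cols) (fun x => x.getD si 0) false
        = order.map g := by
      rw [hrows, pv_sorted_map g (fun x => x.getD si 0) (List.range n), horder, hkey]
    -- order has the n row indices
    have hordlen : order.length = n := by
      rw [horder]
      rw [(PySem.List.sorted_perm _ _ _).length_eq, List.length_range]
    have hk : data_dict.length ≠ 0 := by omega
    -- the back-transpose has min length = number of columns
    have hml : pvMinLen (order.map g) = data_dict.length := by
      apply pv_minLen_const
      · simp only [ne_eq, List.map_eq_nil_iff]
        intro hc; rw [hc] at hordlen; simp at hordlen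
        exact hn hordlen.symm
      · intro c hc
        obtain ⟨i, _, rfl⟩ := List.mem_map.mp hc
        simp [hg, hcl]
    rw [hsorted]
    apply List.ext_getElem
    · simp [pvZipStar, hml]
    · intro j h1 h2
      have hj : j < data_dict.length := by simpa using h2
      have hjz : j < (List.range (pvMinLen (order.map g))).length := by simp [hml, hj]
      simp only [pvZipStar, List.getElem_zip, List.getElem_map, List.getElem_range,
        Prod.mk.injEq]
      have hjc : j < cols.length := by omega
      refine ⟨trivial, ?_⟩
      rw [List.map_map]
      apply List.map_congr_left
      intro i _
      simp [hg, hcols, List.getD_eq_getElem?_getD, List.getElem?_eq_getElem hj]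

-- ===== VERDICT (by name: the statement is the Claim_ definition above) =====
theorem sort_dict_data_spec : Claim_equal_sort_dict_data := by
  intro data_dict sort_column _ hpre
  unfold Spec_sort_dict_data
  exact sort_dict_data_eq data_dict sort_column hpre
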